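-- pv_equiv track=rewrite | github.com/JanisGoldmanis/CodeWars | [6kyu] Frog Jumping.py | solution
-- ===== SOURCE A (Python) =====
-- def solution(a):
--     length = len(a)
--     current_location = 0
--     counter = 0
--     visited_locations = [0]
--     while True:
--         counter += 1
--         if current_location+a[current_location]>=length:
--             return counter
--         if current_location+a[current_location]<0:
--             return counter
--         else:
--             current_location = current_location+a[current_location]
--             if current_location in visited_locations:
--                 return -1
--             if current_location < 0:
--                 return -1
--             visited_locations.append(current_location)
-- ===== SOURCE B (Python) =====
-- def solution(a):
--     length = len(a)
--     current = 0
--     for counter in range(1, length + 2):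
--         nxt = current + a[current]
--         if nxt >= length or nxt < 0:
--             return counter
--         current = nxt
--     return -1
-- ===== Notes on version B (the rewrite author's own statement) =====
-- stated objective: simpler
-- what changed: B drops A's visited-positions list and its linear membership scan, instead bounding the walk to length+1 steps and returning -1 when the bound is exhausted (pigeonhole guarantees a cycle by then).
import Mathlib
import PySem

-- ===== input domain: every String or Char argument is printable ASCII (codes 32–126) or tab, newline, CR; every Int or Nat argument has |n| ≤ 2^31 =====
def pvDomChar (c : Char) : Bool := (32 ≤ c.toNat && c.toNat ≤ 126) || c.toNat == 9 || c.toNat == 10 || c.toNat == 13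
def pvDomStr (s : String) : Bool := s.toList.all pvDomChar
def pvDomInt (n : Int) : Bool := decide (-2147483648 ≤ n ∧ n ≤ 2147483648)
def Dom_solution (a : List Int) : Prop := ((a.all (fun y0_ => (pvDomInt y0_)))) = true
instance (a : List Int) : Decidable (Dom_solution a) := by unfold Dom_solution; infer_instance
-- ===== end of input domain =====

-- B replaces A's visited-list cycle detection by a pigeonhole step bound (at most
-- length+1 iterations), keeping no visited set: simpler (not measured faster).

-- ===== PORT A =====
-- A's 'while True' loop; the fuel argument only makes the recursion total (it is
-- a.length + 1 at the top call, which the proof shows is never exhausted on Pre_).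
def solutionLoop (a : List Int) (fuel : Nat) (cur counter : Int) (vis : List Int) : Int :=
  match fuel with
  | 0 => 0
  | fuel + 1 =>
    let counter := counter + 1
    match PySem.List.pyGet? a cur with
    | none => 0  -- Python raises IndexError here; excluded by Pre_
    | some v =>
      if cur + v ≥ (a.length : Int) then counter
      else if cur + v < 0 then counter
      else
        let cur := cur + v
        if cur ∈ vis then -1
        else if cur < 0 then -1
        else solutionLoop a fuel cur counter (vis ++ [cur])

def solution (a : List Int) : Int :=
  solutionLoop a (a.length + 1) 0 0 [0]

-- ===== PORT B =====
-- B's 'for counter in range(1, length + 2)' loop: n remaining iterations, c = counter.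
def solutionAltLoop (a : List Int) (n : Nat) (c cur : Int) : Int :=
  match n with
  | 0 => -1
  | n + 1 =>
    match PySem.List.pyGet? a cur with
    | none => 0  -- Python raises IndexError here; excluded by Pre_
    | some v =>
      let nxt := cur + v
      if nxt ≥ (a.length : Int) ∨ nxt < 0 then c
      else solutionAltLoop a n (c + 1) nxt

def solution_alt (a : List Int) : Int :=
  solutionAltLoop a (a.length + 1) 1 0

-- ===== PRECONDITION & SPEC =====
-- A raises IndexError on the empty list (a[0]); that is all Pre_ excludes.
def Pre_solution (a : List Int) : Prop := a ≠ []
instance (a : List Int) : Decidable (Pre_solution a) := by unfold Pre_solution; infer_instance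
def pvWitness_solution : List Int := [1, -1]

def Spec_solution (a : List Int) (out : Int) : Prop := out = solution_alt a
instance (a : List Int) (out : Int) : Decidable (Spec_solution a out) := by unfold Spec_solution; infer_instance

-- ===== CLAIM (what is proved, stated in full; the proofs are below) =====
def Claim_equal_solution : Prop := ∀ (a : List Int), Dom_solution a → Pre_solution a → Spec_solution a (solution a)

-- ===== LEMMAS AND PROOFS =====

-- a valid index always reads successfully
lemma pyGet?_of_range (a : List Int) (i : Int) (h0 : 0 ≤ i) (h1 : i < (a.length : Int)) :
    PySem.List.pyGet? a i = some (a[i.toNat]'(by omega)) := by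
  have := PySem.List.pyGet?_of_nonneg (xs := a) h0
  rw [this, List.getElem?_eq_getElem (by omega)]

-- a nodup list of integers all inside [0, n) has length at most n
lemma nodup_length_le (l : List Int) (n : Nat)
    (hnd : l.Nodup) (hr : ∀ p ∈ l, 0 ≤ p ∧ p < (n : Int)) : l.length ≤ n := by
  have hsub : l.toFinset ⊆ Finset.Ico (0 : Int) (n : Int) := by
    intro x hx
    rcases hr x (List.mem_toFinset.mp hx) with ⟨h0, h1⟩
    simp [Finset.mem_Ico]; omega
  have hcard := Finset.card_le_card hsub
  rw [List.toFinset_card_of_nodup hnd] at hcard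
  simpa using hcard

-- once the frog sits inside a set closed under non-escaping steps, B never escapes
lemma altLoop_closed (a : List Int) (S : List Int)
    (hS : ∀ p ∈ S, ∃ v, PySem.List.pyGet? a p = some v ∧
          ¬(p + v ≥ (a.length : Int) ∨ p + v < 0) ∧ p + v ∈ S) :
    ∀ (n : Nat) (c cur : Int), cur ∈ S → solutionAltLoop a n c cur = -1 := by
  intro n
  induction n with
  | zero => intro c cur _; rfl
  | succ n ih =>
    intro c cur hcur
    rcases hS cur hcur with ⟨v, hv, hne, hmem⟩
    simp only [solutionAltLoop, hv, if_neg hne]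
    exact ih (c + 1) (cur + v) hmem

-- the simulation: from any reachable state of A's loop, B's bounded loop agrees
lemma sim (a : List Int) : ∀ (n : Nat) (f : Nat) (counter cur : Int) (vis : List Int),
    n ≤ f →
    cur ∈ vis →
    (∀ p ∈ vis, 0 ≤ p ∧ p < (a.length : Int)) →
    vis.Nodup →
    (∀ p ∈ vis, p ≠ cur → ∃ v, PySem.List.pyGet? a p = some v ∧
        p + v ∈ vis ∧ 0 ≤ p + v ∧ p + v < (a.length : Int)) →
    counter = (vis.length : Int) - 1 →
    (n : Int) = (a.length : Int) + 1 - counter →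
    solutionLoop a f cur counter vis = solutionAltLoop a n (counter + 1) cur := by
  intro n
  induction n with
  | zero =>
    intro f counter cur vis _ hcur hr hnd _ hcnt hn
    exfalso
    have hlen := nodup_length_le vis a.length hnd hr
    have h0 : 0 < vis.length := List.length_pos_of_mem hcur
    omega
  | succ n ih =>
    intro f counter cur vis hf hcur hr hnd hJ hcnt hn
    obtain ⟨f, rfl⟩ : ∃ f', f = f' + 1 := ⟨f - 1, by omega⟩
    rcases hr cur hcur with ⟨hc0, hc1⟩
    have hget := pyGet?_of_range a cur hc0 hc1
    set v : Int := a[cur.toNat]'(by omega) with hv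
    by_cases hesc : cur + v ≥ (a.length : Int)
    · simp only [solutionLoop, solutionAltLoop, hget, if_pos hesc, if_pos (Or.inl hesc)]
    · by_cases hneg : cur + v < 0
      · simp only [solutionLoop, solutionAltLoop, hget, if_neg hesc, if_pos hneg,
          if_pos (Or.inr hneg)]
      · by_cases hrev : cur + v ∈ vis
        · -- A detects a cycle; B keeps walking inside vis and never escapes
          have hne2 : ¬(cur + v ≥ (a.length : Int) ∨ cur + v < 0) := by omega
          simp only [solutionLoop, solutionAltLoop, hget, if_neg hesc, if_neg hneg,
            if_pos hrev, if_neg hne2]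
          have hclosed : ∀ p ∈ vis, ∃ w, PySem.List.pyGet? a p = some w ∧
              ¬(p + w ≥ (a.length : Int) ∨ p + w < 0) ∧ p + w ∈ vis := by
            intro p hp
            by_cases hpc : p = cur
            · subst hpc
              exact ⟨v, hget, by omega, hrev⟩
            · rcases hJ p hp hpc with ⟨w, hw, hmem, h0, h1⟩
              exact ⟨w, hw, by omega, hmem⟩
          rw [altLoop_closed a vis hclosed n (counter + 1 + 1) (cur + v) hrev]
        · -- a fresh position: both loops take the step
          have hne2 : ¬(cur + v ≥ (a.length : Int) ∨ cur + v < 0) := by omega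
          simp only [solutionLoop, solutionAltLoop, hget, if_neg hesc, if_neg hneg,
            if_neg hrev, if_neg hne2]
          have := ih f (counter + 1) (cur + v) (vis ++ [cur + v])
            (by omega)
            (by simp)
            (by intro p hp
                rcases List.mem_append.mp hp with h | h
                · exact hr p h
                · simp at h; subst h; omega)
            (by
              rw [List.nodup_append]
              refine ⟨hnd, List.nodup_singleton _, ?_⟩
              intro x hx y hy
              simp only [List.mem_singleton] at hy
              subst hy
              exact fun hxy => hrev (hxy ▸ hx))
            (by
              intro p hp hne
              rcases List.mem_append.mp hp with h | h
              · by_cases hpc : p = cur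
                · subst hpc
                  exact ⟨v, hget, by simp, by omega, by omega⟩
                · rcases hJ p h hpc with ⟨w, hw, hmem, h0, h1⟩
                  exact ⟨w, hw, List.mem_append.mpr (Or.inl hmem), h0, h1⟩
              · simp at h; exact absurd h hne)
            (by simp [hcnt])
            (by push_cast at hn ⊢; omega)
          rw [this]

-- ===== VERDICT (by name: the statement is the Claim_ definition above) =====
theorem solution_spec : Claim_equal_solution := by
  intro a _ hpre
  unfold Spec_solution solution solution_alt
  have hne : 0 < a.length := List.length_pos_iff.mpr hpre
  have := sim a (a.length + 1) (a.length + 1) 0 0 [0]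
    (le_refl _)
    (by simp)
    (by intro p hp; simp at hp; subst hp; constructor <;> omega)
    (List.nodup_singleton _)
    (by intro p hp hne; simp at hp; exact absurd hp hne)
    (by simp)
    (by push_cast; ring)
  simpa using this
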